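-- pv_equiv track=rewrite | github.com/kubernetes-sigs/scheduler-plugins | bootstrap/validate_job_config_files.py | extract_runner_doc
-- ===== SOURCE A (Python) =====
-- def extract_runner_doc(docs):
--     for d in docs:
--         if isinstance(d, dict) and d.get("kind") == "KwokRunConfiguration":
--             return d
--     for d in docs:
--         if isinstance(d, dict):
--             return d
--     return {}
-- ===== SOURCE B (Python) =====
-- def extract_runner_doc(docs):
--     first_dict = None
--     for d in docs:
--         if isinstance(d, dict):
--             if d.get("kind") == "KwokRunConfiguration":
--                 return d
--             if first_dict is None:
--                 first_dict = d
--     return first_dict if first_dict is not None else {}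
-- ===== Notes on version B (the rewrite author's own statement) =====
-- stated objective: simpler
-- what changed: Replaced A's two sequential scans over docs with a single pass that returns immediately on a kind match and carries the first dict seen in an accumulator.
import Mathlib
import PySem

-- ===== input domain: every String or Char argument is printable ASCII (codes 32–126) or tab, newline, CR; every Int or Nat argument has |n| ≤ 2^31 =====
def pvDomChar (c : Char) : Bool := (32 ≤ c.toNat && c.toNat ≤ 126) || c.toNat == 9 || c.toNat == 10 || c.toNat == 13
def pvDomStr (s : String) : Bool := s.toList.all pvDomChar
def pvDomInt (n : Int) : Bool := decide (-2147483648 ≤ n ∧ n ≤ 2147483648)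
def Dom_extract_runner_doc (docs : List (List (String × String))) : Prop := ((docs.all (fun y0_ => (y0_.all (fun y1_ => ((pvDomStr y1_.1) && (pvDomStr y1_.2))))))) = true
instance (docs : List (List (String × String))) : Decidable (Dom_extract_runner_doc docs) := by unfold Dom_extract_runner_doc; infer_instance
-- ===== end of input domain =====

-- B replaces A's two sequential scans with a single pass carrying the first dict seen as an accumulator (objective: simpler).
-- ===== PORT A =====
-- first loop: return the first doc whose "kind" is "KwokRunConfiguration" (every element is a dict)
def pvFindKind (docs : List (List (String × String))) : Option (List (String × String)) :=
  match docs with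
  | [] => none
  | d :: rest =>
      if (PySem.Dict.mk d).get? "kind" = some "KwokRunConfiguration" then some d
      else pvFindKind rest

-- second loop: return the first doc (isinstance(d, dict) is always true under the type convention)
def pvFindDict (docs : List (List (String × String))) : Option (List (String × String)) :=
  match docs with
  | [] => none
  | d :: _ => some d

def extract_runner_doc (docs : List (List (String × String))) : List (String × String) :=
  match pvFindKind docs with
  | some d => d
  | none =>
      match pvFindDict docs with
      | some d => d
      | none => []

-- ===== PORT B =====
-- B: single pass carrying first_dict as an accumulator
def pvScan (docs : List (List (String × String))) (firstDict : Option (List (String × String))) :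
    List (String × String) :=
  match docs with
  | [] => firstDict.getD []
  | d :: rest =>
      if (PySem.Dict.mk d).get? "kind" = some "KwokRunConfiguration" then d
      else pvScan rest (if firstDict.isNone then some d else firstDict)

def extract_runner_doc_alt (docs : List (List (String × String))) : List (String × String) :=
  pvScan docs none

-- ===== PRECONDITION & SPEC =====
def Spec_extract_runner_doc (docs : List (List (String × String))) (out : List (String × String)) : Prop := out = extract_runner_doc_alt docs
instance (docs : List (List (String × String))) (out : List (String × String)) : Decidable (Spec_extract_runner_doc docs out) := by unfold Spec_extract_runner_doc; infer_instance

-- ===== CLAIM (what is proved, stated in full; the proofs are below) =====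
def Claim_equal_extract_runner_doc : Prop := ∀ (docs : List (List (String × String))), Dom_extract_runner_doc docs → Spec_extract_runner_doc docs (extract_runner_doc docs)

-- ===== LEMMAS AND PROOFS =====

-- ===== VERDICT (by name: the statement is the Claim_ definition above) =====
-- invariant: pvScan with accumulator `acc` equals A's two-scan result with acc as fallback
theorem pvScan_eq (docs : List (List (String × String))) (acc : Option (List (String × String))) :
    pvScan docs acc =
      match pvFindKind docs with
      | some d => d
      | none =>
          match acc with
          | some a => a
          | none =>
              match pvFindDict docs with
              | some d => d
              | none => [] := by
  induction docs generalizing acc with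
  | nil => cases acc <;> simp [pvScan, pvFindKind, pvFindDict, Option.getD]
  | cons d rest ih =>
      simp only [pvScan, pvFindKind, pvFindDict]
      split_ifs with h h2
      · rfl
      · rw [ih]
        cases acc with
        | none => cases pvFindKind rest <;> simp [pvFindDict]
        | some a => simp [Option.isNone] at h2
      · rw [ih]
        cases acc with
        | none => simp [Option.isNone] at h2
        | some a => cases pvFindKind rest <;> rfl

theorem extract_runner_doc_spec : Claim_equal_extract_runner_doc := by
  intro docs _
  unfold Spec_extract_runner_doc extract_runner_doc extract_runner_doc_alt
  rw [pvScan_eq]
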